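-- pv_equiv track=rewrite | github.com/ciscoriordan/opla | fix_heads_deep.py | find_verb
-- ===== SOURCE A (Python) =====
-- def tid(t):
--     return int(t[0])
--
-- def upos(t):
--     return t[3]
--
-- def find_verb(tokens):
--     """Find the main verb (first finite verb, or first verb)."""
--     for t in tokens:
--         if upos(t) == "VERB" and "VerbForm=Fin" in t[5]:
--             return tid(t)
--     for t in tokens:
--         if upos(t) == "VERB":
--             return tid(t)
--     return 0
-- ===== SOURCE B (Python) =====
-- def find_verb(tokens):
--     """Find the main verb (first finite verb, or first verb). Single pass."""
--     first_fin = None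
--     first_verb = None
--     for t in tokens:
--         if t[3] == "VERB":
--             if first_verb is None:
--                 first_verb = t
--             if "VerbForm=Fin" in t[5]:
--                 first_fin = t
--                 break
--     t = first_fin if first_fin is not None else first_verb
--     return int(t[0]) if t is not None else 0
-- ===== Notes on version B (the rewrite author's own statement) =====
-- stated objective: alternative
-- what changed: Replaces A's two sequential scans (finite-verb scan, then verb scan) by a single pass carrying first_fin/first_verb accumulators with an early break, converting the chosen token's id only at the end.
import Mathlib
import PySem

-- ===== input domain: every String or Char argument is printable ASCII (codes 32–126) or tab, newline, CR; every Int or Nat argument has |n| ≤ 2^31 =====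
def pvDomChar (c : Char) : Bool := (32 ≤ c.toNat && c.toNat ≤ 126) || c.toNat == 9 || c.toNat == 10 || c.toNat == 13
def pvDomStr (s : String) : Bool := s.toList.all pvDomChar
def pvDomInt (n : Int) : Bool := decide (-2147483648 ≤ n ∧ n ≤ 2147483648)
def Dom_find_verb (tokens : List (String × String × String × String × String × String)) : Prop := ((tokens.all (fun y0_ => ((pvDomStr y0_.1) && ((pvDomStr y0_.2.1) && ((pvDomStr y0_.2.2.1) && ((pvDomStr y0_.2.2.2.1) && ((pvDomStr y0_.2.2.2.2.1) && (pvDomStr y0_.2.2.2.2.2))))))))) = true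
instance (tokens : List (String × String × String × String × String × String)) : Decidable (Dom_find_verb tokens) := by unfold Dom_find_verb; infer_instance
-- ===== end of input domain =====

-- B replaces A's two sequential scans by one pass with two accumulators and an early break; return value only (no mutation).

-- ===== PORT A =====
-- upos(t) == "VERB"
def pvIsVerb (t : String × String × String × String × String × String) : Bool :=
  t.2.2.2.1 == "VERB"
-- upos(t) == "VERB" and "VerbForm=Fin" in t[5]
def pvIsFin (t : String × String × String × String × String × String) : Bool :=
  pvIsVerb t && PySem.Str.isIn "VerbForm=Fin" t.2.2.2.2.2
-- first loop of A: return tid(t) at the first finite verb (none = fell through, or int() would raise — excluded by Pre_)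
def pvLoopFin : List (String × String × String × String × String × String) → Option Int
  | [] => none
  | t :: ts => if pvIsFin t then PySem.Int.ofStr? t.1 else pvLoopFin ts
-- second loop of A: return tid(t) at the first verb
def pvLoopVerb : List (String × String × String × String × String × String) → Option Int
  | [] => none
  | t :: ts => if pvIsVerb t then PySem.Int.ofStr? t.1 else pvLoopVerb ts

def find_verb (tokens : List (String × String × String × String × String × String)) : Int :=
  match pvLoopFin tokens with
  | some i => i
  | none =>
    match pvLoopVerb tokens with
    | some i => i
    | none => 0

-- ===== PORT B =====
-- single pass carrying first_verb; returns (first_fin at break, first_verb)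
def pvScan : List (String × String × String × String × String × String) →
    Option (String × String × String × String × String × String) →
    Option (String × String × String × String × String × String) ×
    Option (String × String × String × String × String × String)
  | [], fv => (none, fv)
  | t :: ts, fv =>
    if t.2.2.2.1 == "VERB" then
      let fv' := if fv.isNone then some t else fv
      if PySem.Str.isIn "VerbForm=Fin" t.2.2.2.2.2 then (some t, fv')
      else pvScan ts fv'
    else pvScan ts fv

def find_verb_alt (tokens : List (String × String × String × String × String × String)) : Int :=
  let (ff, fv) := pvScan tokens none
  match (match ff with | some t => some t | none => fv) with
  | some t => (PySem.Int.ofStr? t.1).getD 0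
  | none => 0

-- ===== PRECONDITION & SPEC =====
-- Pre_ excludes exactly the inputs where A raises ValueError: the returned token's id (first finite verb's, else first verb's) does not parse as an int.
def Pre_find_verb (tokens : List (String × String × String × String × String × String)) : Prop :=
  (((tokens.find? pvIsFin).or (tokens.find? pvIsVerb)).all
    (fun t => (PySem.Int.ofStr? t.1).isSome)) = true
instance (tokens : List (String × String × String × String × String × String)) : Decidable (Pre_find_verb tokens) := by unfold Pre_find_verb; infer_instance

def pvWitness_find_verb : (List (String × String × String × String × String × String)) :=
  [("1", "", "", "NOUN", "", ""), ("2", "", "", "VERB", "", ""), ("3", "", "", "VERB", "", "VerbForm=Fin")]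

def Spec_find_verb (tokens : List (String × String × String × String × String × String)) (out : Int) : Prop := out = find_verb_alt tokens
instance (tokens : List (String × String × String × String × String × String)) (out : Int) : Decidable (Spec_find_verb tokens out) := by unfold Spec_find_verb; infer_instance

-- ===== CLAIM (what is proved, stated in full; the proofs are below) =====
def Claim_equal_find_verb : Prop := ∀ (tokens : List (String × String × String × String × String × String)), Dom_find_verb tokens → Pre_find_verb tokens → Spec_find_verb tokens (find_verb tokens)

-- ===== LEMMAS AND PROOFS =====
theorem pvLoopFin_eq (ts : List (String × String × String × String × String × String)) :
    pvLoopFin ts = (ts.find? pvIsFin).bind (fun t => PySem.Int.ofStr? t.1) := by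
  induction ts with
  | nil => rfl
  | cons t ts ih =>
    simp only [pvLoopFin, List.find?]
    by_cases h : pvIsFin t = true <;> simp [h, ih]

theorem pvLoopVerb_eq (ts : List (String × String × String × String × String × String)) :
    pvLoopVerb ts = (ts.find? pvIsVerb).bind (fun t => PySem.Int.ofStr? t.1) := by
  induction ts with
  | nil => rfl
  | cons t ts ih =>
    simp only [pvLoopVerb, List.find?]
    by_cases h : pvIsVerb t = true <;> simp [h, ih]

theorem pvScan_fst (ts : List (String × String × String × String × String × String))
    (fv : Option (String × String × String × String × String × String)) :
    (pvScan ts fv).1 = ts.find? pvIsFin := by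
  induction ts generalizing fv with
  | nil => rfl
  | cons t ts ih =>
    simp only [pvScan, List.find?, pvIsFin, pvIsVerb]
    by_cases hv : (t.2.2.2.1 == "VERB") = true <;>
      by_cases hf : PySem.Chars.isIn ['V','e','r','b','F','o','r','m','=','F','i','n'] t.2.2.2.2.2.toList = true <;>
      simp [hv, hf, ih]

theorem pvScan_snd (ts : List (String × String × String × String × String × String))
    (fv : Option (String × String × String × String × String × String))
    (hnf : ts.find? pvIsFin = none) :
    (pvScan ts fv).2 = (fv.or (ts.find? pvIsVerb)) := by
  induction ts generalizing fv with
  | nil => cases fv <;> rfl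
  | cons t ts ih =>
    by_cases hft : pvIsFin t = true
    · exfalso; simp [List.find?, hft] at hnf
    · have hnf' : ts.find? pvIsFin = none := by
        simpa [List.find?, hft] using hnf
      simp only [pvScan]
      by_cases hv : (t.2.2.2.1 == "VERB") = true
      · have hf : PySem.Str.isIn "VerbForm=Fin" t.2.2.2.2.2 = false := by
          simp [pvIsFin, pvIsVerb, hv] at hft
          exact hft
        simp only [PySem.Str.isIn_eq] at hf
        rw [show ("VerbForm=Fin":String).toList = ['V','e','r','b','F','o','r','m','=','F','i','n'] from rfl] at hf
      -- verb but not finite: accumulator may be set, find? pvIsVerb hits t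
        cases fv with
        | none => simp [hv, hf, List.find?, pvIsVerb, ih _ hnf']
        | some x => simp [hv, hf, List.find?, pvIsVerb, ih _ hnf']
      · simp [hv, List.find?, pvIsVerb, ih _ hnf']

-- ===== VERDICT (by name: the statement is the Claim_ definition above) =====
theorem find_verb_spec : Claim_equal_find_verb := by
  intro tokens _ hpre
  unfold Spec_find_verb find_verb find_verb_alt
  unfold Pre_find_verb at hpre
  rw [pvLoopFin_eq, pvLoopVerb_eq]
  have h1 := pvScan_fst tokens none
  rcases hsc : pvScan tokens none with ⟨ff, fv⟩
  rw [hsc] at h1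
  rcases hff : tokens.find? pvIsFin with _ | t
  · rw [hff] at h1 hpre
    subst h1
    have h2 := pvScan_snd tokens none hff
    rw [hsc] at h2
    simp only [Option.none_or] at h2
    subst h2
    rcases hfv : tokens.find? pvIsVerb with _ | t
    · simp
    · rw [hfv] at hpre
      simp only [Option.none_or, Option.all_some] at hpre
      rcases hs : PySem.Int.ofStr? t.1 with _ | i
      · rw [hs] at hpre; simp at hpre
      · simp [hs]
  · rw [hff] at h1 hpre
    subst h1
    simp only [Option.some_or, Option.all_some] at hpre
    rcases hs : PySem.Int.ofStr? t.1 with _ | i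
    · rw [hs] at hpre; simp at hpre
    · simp [hs]
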